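-- pv_equiv track=rewrite | github.com/andreskwan/HR-Python-Learning | Katas/UB-Sort.py | swap_computed
-- ===== SOURCE A (Python) =====
-- def swap_computed(array, middle):
--     lower = None
--     higher = None
--     for value in array:
--         if value > middle:
--             higher = value
--         elif value < middle:
--             lower = value
--     return higher, lower
-- ===== SOURCE B (Python) =====
-- def swap_computed(array, middle):
--     seq = list(array)
--     higher = next((v for v in reversed(seq) if v > middle), None)
--     lower = next((v for v in reversed(seq) if v < middle), None)
--     return higher, lower
-- ===== Notes on version B (the rewrite author's own statement) =====
-- stated objective: idiomatic
-- what changed: Replaces the forward pass that keeps overwriting two accumulators by two short-circuiting reverse scans that return the first match from the end (next over reversed).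
import Mathlib
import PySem

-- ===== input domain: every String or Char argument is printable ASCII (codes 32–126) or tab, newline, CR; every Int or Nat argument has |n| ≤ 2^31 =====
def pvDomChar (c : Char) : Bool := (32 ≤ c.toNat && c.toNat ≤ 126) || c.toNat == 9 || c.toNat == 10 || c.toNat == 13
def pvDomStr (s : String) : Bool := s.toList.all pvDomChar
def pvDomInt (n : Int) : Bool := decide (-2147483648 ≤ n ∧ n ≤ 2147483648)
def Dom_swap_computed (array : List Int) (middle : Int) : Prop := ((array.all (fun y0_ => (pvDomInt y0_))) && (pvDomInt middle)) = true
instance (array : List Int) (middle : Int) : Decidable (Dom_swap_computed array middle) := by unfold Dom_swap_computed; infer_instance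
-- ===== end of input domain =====

-- B replaces the forward accumulating pass by two short-circuiting reverse scans (idiomatic; same behaviour).

-- ===== PORT A =====
-- forward loop: state (lower, higher), overwritten at each matching element
def swap_computed (array : List Int) (middle : Int) : Option Int × Option Int :=
  let s := array.foldl
    (fun (st : Option Int × Option Int) value =>
      if value > middle then (st.1, some value)
      else if value < middle then (some value, st.2)
      else st)
    (none, none)
  (s.2, s.1)

-- ===== PORT B =====
-- two reverse scans, each returning the first match from the end
def swap_computed_alt (array : List Int) (middle : Int) : Option Int × Option Int :=
  let seq := array
  (seq.reverse.find? (fun v => decide (v > middle)),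
   seq.reverse.find? (fun v => decide (v < middle)))

-- ===== PRECONDITION & SPEC =====
def Spec_swap_computed (array : List Int) (middle : Int) (out : Option Int × Option Int) : Prop := out = swap_computed_alt array middle
instance (array : List Int) (middle : Int) (out : Option Int × Option Int) : Decidable (Spec_swap_computed array middle out) := by unfold Spec_swap_computed; infer_instance

-- ===== CLAIM (what is proved, stated in full; the proofs are below) =====
def Claim_equal_swap_computed : Prop := ∀ (array : List Int) (middle : Int), Dom_swap_computed array middle → Spec_swap_computed array middle (swap_computed array middle)

-- ===== LEMMAS AND PROOFS =====
theorem swap_computed_foldl_find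
    (middle : Int) (array : List Int) (st : Option Int × Option Int) :
    array.foldl
      (fun (st : Option Int × Option Int) value =>
        if value > middle then (st.1, some value)
        else if value < middle then (some value, st.2)
        else st)
      st
    = ((array.reverse.find? (fun v => decide (v < middle))).or st.1,
       (array.reverse.find? (fun v => decide (v > middle))).or st.2) := by
  induction array generalizing st with
  | nil => simp
  | cons a t ih =>
    simp only [List.foldl_cons, ih, List.reverse_cons, List.find?_append]
    by_cases h1 : a > middle
    · have h1' : ¬ a < middle := by omega
      simp [List.find?, h1, h1', Option.or_assoc]
    · by_cases h2 : a < middle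
      · simp [List.find?, h1, h2, Option.or_assoc]
      · simp [List.find?, h1, h2]

-- ===== VERDICT (by name: the statement is the Claim_ definition above) =====
theorem swap_computed_spec : Claim_equal_swap_computed := by
  intro array middle _
  show _ = _
  simp [swap_computed, swap_computed_alt, swap_computed_foldl_find]
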